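-- pv_equiv track=rewrite | github.com/renanpchaves/darkmoon-records | api/services/music_service.py | _extract_best_lastfm_image
-- ===== SOURCE A (Python) =====
-- from typing import Dict, List, Optional
--
-- def _extract_best_lastfm_image(images: List[Dict]) -> Optional[str]:
--     """
--     Return the best available image URL from Last.fm image array.
--
--     Last.fm usually returns multiple sizes.
--     We prefer the last non-empty image.
--     """
--     if not images:
--         return None
--
--     for image in reversed(images):
--         url = image.get("#text")
--         if url:
--             return url
--
--     return None
-- ===== SOURCE B (Python) =====
-- from typing import Dict, List, Optional
--
-- def _extract_best_lastfm_image(images: List[Dict]) -> Optional[str]: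
--     best = None
--     for image in images:
--         url = image.get("#text")
--         if url:
--             best = url
--     return best
-- ===== Notes on version B (the rewrite author's own statement) =====
-- stated objective: simpler
-- what changed: Replaces the empty-list guard plus reversed early-exit scan with a single forward pass keeping the last truthy URL in an accumulator.
import Mathlib
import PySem

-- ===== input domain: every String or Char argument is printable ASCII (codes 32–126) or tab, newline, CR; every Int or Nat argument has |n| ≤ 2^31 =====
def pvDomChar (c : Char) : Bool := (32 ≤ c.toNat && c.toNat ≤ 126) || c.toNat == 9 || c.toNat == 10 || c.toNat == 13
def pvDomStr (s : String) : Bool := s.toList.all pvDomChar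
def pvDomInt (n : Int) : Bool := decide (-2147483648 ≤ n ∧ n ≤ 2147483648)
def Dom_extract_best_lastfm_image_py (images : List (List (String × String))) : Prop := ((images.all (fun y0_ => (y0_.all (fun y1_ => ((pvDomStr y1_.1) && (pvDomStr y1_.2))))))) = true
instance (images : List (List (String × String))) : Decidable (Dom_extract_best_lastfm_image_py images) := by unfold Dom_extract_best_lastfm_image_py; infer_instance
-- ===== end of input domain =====

-- ===== PORT A =====
-- B differs from A by a single forward accumulator pass instead of a reversed early-exit scan.
-- image.get("#text"): first match in the association list
def pvGetText (img : List (String × String)) : Option String :=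
  (img.find? (fun p => p.1 == "#text")).map (·.2)

-- Python truthiness of an Optional[str]
def pvTruthy (o : Option String) : Bool :=
  match o with
  | some s => s ≠ ""
  | none => false

-- the 'for image in reversed(images)' loop with early return
def pvGoA : List (List (String × String)) → Option String
  | [] => none
  | img :: rest =>
    let url := pvGetText img
    if pvTruthy url then url else pvGoA rest

def extract_best_lastfm_image_py (images : List (List (String × String))) : Option String :=
  if images = [] then none else pvGoA images.reverse

-- ===== PORT B =====
def extract_best_lastfm_image_py_alt (images : List (List (String × String))) : Option String :=
  images.foldl (fun best img =>
    let url := pvGetText img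
    if pvTruthy url then url else best) none

-- ===== PRECONDITION & SPEC =====
def Spec_extract_best_lastfm_image_py (images : List (List (String × String))) (out : Option String) : Prop := out = extract_best_lastfm_image_py_alt images
instance (images : List (List (String × String))) (out : Option String) : Decidable (Spec_extract_best_lastfm_image_py images out) := by unfold Spec_extract_best_lastfm_image_py; infer_instance

-- ===== CLAIM (what is proved, stated in full; the proofs are below) =====
def Claim_equal_extract_best_lastfm_image_py : Prop := ∀ (images : List (List (String × String))), Dom_extract_best_lastfm_image_py images → Spec_extract_best_lastfm_image_py images (extract_best_lastfm_image_py images)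

-- ===== LEMMAS AND PROOFS =====
theorem pvGoA_reverse_eq_foldl (l : List (List (String × String))) :
    pvGoA l.reverse = l.foldl (fun best img =>
      let url := pvGetText img
      if pvTruthy url then url else best) none := by
  induction l using List.reverseRecOn with
  | nil => rfl
  | append_singleton l x ih =>
    simp [List.foldl_append, pvGoA, ← ih]

-- ===== VERDICT (by name: the statement is the Claim_ definition above) =====
theorem extract_best_lastfm_image_py_spec : Claim_equal_extract_best_lastfm_image_py := by
  intro images _
  unfold Spec_extract_best_lastfm_image_py extract_best_lastfm_image_py extract_best_lastfm_image_py_alt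
  by_cases h : images = []
  · subst h; rfl
  · rw [if_neg h, pvGoA_reverse_eq_foldl]
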